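-- pv_equiv track=rewrite | github.com/Aalam2000/assistchat | src/app/core/dialog_service.py | _rows_to_history
-- ===== SOURCE A (Python) =====
-- from typing import Any, Dict, List, Optional, Tuple
--
-- def _rows_to_history(rows: List[Tuple[str, str]]) -> List[Dict[str, str]]:
--     hist: List[Dict[str, str]] = []
--     for direction, txt in rows:
--         t = (txt or "").strip()
--         if not t:
--             continue
--         role = "user" if direction == "in" else "assistant"
--         if hist and hist[-1]["content"] == t:
--             continue
--         hist.append({"role": role, "content": t})
--     return hist
-- ===== SOURCE B (Python) =====
-- def _rows_to_history(rows):
--     # Run-scanner: strip/filter once, then walk the filtered list run by run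
--     # (two indices): each maximal run of equal texts yields exactly one dict.
--     filtered = [(d, t) for d, t in ((d, (txt or "").strip()) for d, txt in rows) if t]
--     out = []
--     i = 0
--     n = len(filtered)
--     while i < n:
--         d, t = filtered[i]
--         j = i + 1
--         while j < n and filtered[j][1] == t:
--             j += 1
--         out.append({"role": "user" if d == "in" else "assistant", "content": t})
--         i = j
--     return out
-- ===== Notes on version B (the rewrite author's own statement) =====
-- stated objective: alternative
-- what changed: Replaces A's stateful accumulator loop (compare each row against hist[-1]['content']) by a run-scanner: strip/filter once into a list, then a two-index outer/inner loop that jumps over each maximal run of equal stripped texts and emits one dict per run.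
import Mathlib
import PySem

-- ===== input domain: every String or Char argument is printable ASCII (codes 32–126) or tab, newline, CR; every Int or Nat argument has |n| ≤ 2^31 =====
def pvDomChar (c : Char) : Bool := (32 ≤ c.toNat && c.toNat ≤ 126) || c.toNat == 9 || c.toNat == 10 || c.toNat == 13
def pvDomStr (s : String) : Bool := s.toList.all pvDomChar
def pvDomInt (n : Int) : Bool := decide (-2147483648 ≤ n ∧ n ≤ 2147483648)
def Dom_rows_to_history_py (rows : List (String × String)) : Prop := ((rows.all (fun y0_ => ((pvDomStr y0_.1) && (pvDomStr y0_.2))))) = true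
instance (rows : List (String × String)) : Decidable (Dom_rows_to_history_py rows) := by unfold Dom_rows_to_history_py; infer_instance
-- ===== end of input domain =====

-- B replaces A's stateful hist[-1]-comparison loop by a run-scanner: filter/strip
-- once, then jump run-by-run over the filtered list, emitting one dict per maximal
-- run of equal stripped texts (alternative decomposition, same cost).

-- ===== PORT A =====
-- Python's `(txt or "").strip()` for a str equals `txt.strip()` exactly.
-- `hist[-1]["content"]` is the last dict's (assoc list's) first "content" entry.
def rows_to_history_py (rows : List (String × String)) : List (List (String × String)) :=
  rows.foldl (fun hist dirtxt =>
    let t := PySem.Str.strip dirtxt.2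
    if t = "" then hist
    else
      let role := if dirtxt.1 = "in" then "user" else "assistant"
      match hist.getLast? with
      | some last =>
          if last.lookup "content" = some t then hist
          else hist ++ [[("role", role), ("content", t)]]
      | none => hist ++ [[("role", role), ("content", t)]]) []

-- ===== PORT B =====
-- B's outer while loop over the filtered list: the inner `while j < n and
-- filtered[j][1] == t: j += 1` plus `i = j` is exactly dropping the leading run
-- of pairs whose text equals t (List.dropWhile), then recursing on the rest.
def pvGo : List (String × String) → List (List (String × String))
  | [] => []
  | (d, t) :: r =>
      [("role", if d = "in" then "user" else "assistant"), ("content", t)] ::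
        pvGo (r.dropWhile (fun q => q.2 == t))
  termination_by l => l.length
  decreasing_by
    simp only [List.length_cons]
    exact Nat.lt_succ_of_le (List.length_dropWhile_le _ _)

def rows_to_history_py_alt (rows : List (String × String)) : List (List (String × String)) :=
  let filtered := rows.filterMap (fun p =>
    let t := PySem.Str.strip p.2
    if t = "" then none else some (p.1, t))
  pvGo filtered

-- ===== PRECONDITION & SPEC =====
def Spec_rows_to_history_py (rows : List (String × String)) (out : List (List (String × String))) : Prop := out = rows_to_history_py_alt rows
instance (rows : List (String × String)) (out : List (List (String × String))) : Decidable (Spec_rows_to_history_py rows out) := by unfold Spec_rows_to_history_py; infer_instance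

-- ===== CLAIM (what is proved, stated in full; the proofs are below) =====
def Claim_equal_rows_to_history_py : Prop := ∀ (rows : List (String × String)), Dom_rows_to_history_py rows → Spec_rows_to_history_py rows (rows_to_history_py rows)

-- ===== LEMMAS AND PROOFS =====

/-- The filtered list both programs work on: (direction, stripped text), empties dropped. -/
def pvFilt (rows : List (String × String)) : List (String × String) :=
  rows.filterMap (fun p =>
    let t := PySem.Str.strip p.2
    if t = "" then none else some (p.1, t))

/-- Dict literal emitted for a filtered pair. -/
def pvMk (q : String × String) : List (String × String) :=
  [("role", if q.1 = "in" then "user" else "assistant"), ("content", q.2)]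

/-- A's loop body on an already-filtered pair. -/
def pvStep (hist : List (List (String × String))) (q : String × String) :
    List (List (String × String)) :=
  match hist.getLast? with
  | some last => if last.lookup "content" = some q.2 then hist else hist ++ [pvMk q]
  | none => hist ++ [pvMk q]

/-- Reference form: keep a filtered pair iff its text differs from the previous text. -/
def pvDedup : Option String → List (String × String) → List (String × String)
  | _, [] => []
  | last, q :: r => if last = some q.2 then pvDedup last r else q :: pvDedup (some q.2) r

/-- Content of the last emitted dict, A's comparison state. -/
def pvLastC (hist : List (List (String × String))) : Option String :=
  hist.getLast?.bind (fun d => d.lookup "content")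

theorem pvLastC_append (hist : List (List (String × String))) (q : String × String) :
    pvLastC (hist ++ [pvMk q]) = some q.2 := by
  simp [pvLastC, pvMk, List.lookup]

theorem pvL1 (rows : List (String × String)) (hist : List (List (String × String))) :
    rows.foldl (fun hist dirtxt =>
      let t := PySem.Str.strip dirtxt.2
      if t = "" then hist
      else
        let role := if dirtxt.1 = "in" then "user" else "assistant"
        match hist.getLast? with
        | some last =>
            if last.lookup "content" = some t then hist
            else hist ++ [[("role", role), ("content", t)]]
        | none => hist ++ [[("role", role), ("content", t)]]) hist
    = (pvFilt rows).foldl pvStep hist := by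
  induction rows generalizing hist with
  | nil => rfl
  | cons p rest ih =>
      by_cases h : PySem.Str.strip p.2 = ""
      · simp only [List.foldl_cons, pvFilt, List.filterMap_cons, h]
        exact ih hist
      · simp only [List.foldl_cons, pvFilt, List.filterMap_cons, h]
        rw [ih]
        simp [pvFilt, pvStep, pvMk]

theorem pvL2 (l : List (String × String)) (hist : List (List (String × String))) :
    l.foldl pvStep hist = hist ++ (pvDedup (pvLastC hist) l).map pvMk := by
  induction l generalizing hist with
  | nil => simp [pvDedup]
  | cons q r ih =>
      rw [List.foldl_cons]
      cases hh : hist.getLast? with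
      | none =>
          have hl : pvLastC hist = none := by simp [pvLastC, hh]
          rw [show pvStep hist q = hist ++ [pvMk q] from by simp [pvStep, hh]]
          rw [ih, pvLastC_append, hl]
          simp [pvDedup]
      | some d =>
          have hl : pvLastC hist = d.lookup "content" := by simp [pvLastC, hh]
          by_cases hc : d.lookup "content" = some q.2
          · rw [show pvStep hist q = hist from by simp [pvStep, hh, hc]]
            rw [ih, hl, hc]
            simp [pvDedup]
          · rw [show pvStep hist q = hist ++ [pvMk q] from by simp [pvStep, hh, hc]]
            rw [ih, pvLastC_append]
            rw [show pvDedup (pvLastC hist) (q :: r)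
                  = q :: pvDedup (some q.2) r from by
              rw [hl]; simp [pvDedup, hc]]
            simp

theorem pvA_eq (rows : List (String × String)) :
    rows_to_history_py rows = (pvDedup none (pvFilt rows)).map pvMk := by
  unfold rows_to_history_py
  rw [pvL1, pvL2]
  simp [pvLastC]

/-- Skipping a leading run of text `t` is exactly what the `some t` state of
`pvDedup` does. -/
theorem pvDedup_some_eq_dropWhile (t : String) (r : List (String × String)) :
    pvDedup (some t) r = pvDedup none (r.dropWhile (fun q => q.2 == t)) := by
  induction r with
  | nil => rfl
  | cons q r' ih =>
      by_cases hq : q.2 = t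
      · rw [show pvDedup (some t) (q :: r') = pvDedup (some t) r' from by
          simp [pvDedup, hq]]
        rw [ih]
        congr 1
        simp [List.dropWhile, hq]
      · have hb : (q.2 == t) = false := by simp [hq]
        rw [show (q :: r').dropWhile (fun q => q.2 == t) = q :: r' from by
          simp [List.dropWhile, hb]]
        simp [pvDedup, Ne.symm hq]

theorem pvGo_eq (l : List (String × String)) :
    pvGo l = (pvDedup none l).map pvMk := by
  induction l using pvGo.induct with
  | case1 => simp [pvGo, pvDedup]
  | case2 d t r ih =>
      rw [pvGo, ih, ← pvDedup_some_eq_dropWhile]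
      simp [pvDedup, pvMk]

theorem pvB_eq (rows : List (String × String)) :
    rows_to_history_py_alt rows = (pvDedup none (pvFilt rows)).map pvMk := by
  unfold rows_to_history_py_alt
  rw [show (rows.filterMap (fun p =>
      let t := PySem.Str.strip p.2
      if t = "" then none else some (p.1, t))) = pvFilt rows from rfl]
  exact pvGo_eq _

-- ===== VERDICT (by name: the statement is the Claim_ definition above) =====
theorem rows_to_history_py_spec : Claim_equal_rows_to_history_py := by
  intro rows _
  unfold Spec_rows_to_history_py
  rw [pvA_eq, pvB_eq]
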